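-- pv_equiv track=rewrite | github.com/binoyskaria/NLP_google_collab_projects | tokenization_Good_turing_smoothing_linear_interpolation/language_model.py | getCountToCountOfCounts
-- ===== SOURCE A (Python) =====
-- def getCountToCountOfCounts(wordCount):
--     CountToCountOfCounts = {}
--     for count in wordCount.values():
--         if count not in CountToCountOfCounts:
--             CountToCountOfCounts[count] = 1
--         else:
--             CountToCountOfCounts[count] += 1
--     return CountToCountOfCounts
-- ===== SOURCE B (Python) =====
-- def getCountToCountOfCounts(wordCount):
--     # Dedup-then-count: list the distinct count values in first-occurrence
--     # order, then count each one's occurrences with list.count.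
--     vals = list(wordCount.values())
--     out = {}
--     for c in dict.fromkeys(vals):
--         out[c] = vals.count(c)
--     return out
-- ===== Notes on version B (the rewrite author's own statement) =====
-- stated objective: alternative
-- what changed: Replaces the incremental membership-test-and-increment histogram loop with a two-phase dedup-then-count pass: collect the distinct count values (first-occurrence order) via dict.fromkeys, then compute each one's frequency with list.count.
import Mathlib
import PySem

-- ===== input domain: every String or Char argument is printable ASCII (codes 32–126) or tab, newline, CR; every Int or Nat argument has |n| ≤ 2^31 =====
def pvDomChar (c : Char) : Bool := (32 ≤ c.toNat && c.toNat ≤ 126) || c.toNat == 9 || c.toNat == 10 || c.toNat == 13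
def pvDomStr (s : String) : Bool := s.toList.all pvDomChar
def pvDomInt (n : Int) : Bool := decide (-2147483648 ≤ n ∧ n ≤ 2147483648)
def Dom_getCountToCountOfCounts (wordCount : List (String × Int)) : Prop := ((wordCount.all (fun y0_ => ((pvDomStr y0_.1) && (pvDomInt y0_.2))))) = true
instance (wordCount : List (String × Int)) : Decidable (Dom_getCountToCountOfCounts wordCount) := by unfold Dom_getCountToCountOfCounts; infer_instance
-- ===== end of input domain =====

-- B replaces A's incremental histogram loop with a dedup-then-count pass (same cost class; 'alternative').


-- ===== PORT A =====
-- for count in wordCount.values(): if count not in d: d[count] = 1 else: d[count] += 1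
def getCountToCountOfCounts (wordCount : List (String × Int)) : List (Int × Int) :=
  ((PySem.Dict.mk wordCount).values.foldl
    (fun d count =>
      if d.contains count = false then d.insert count 1
      else d.insert count (d.getD count 0 + 1))
    PySem.Dict.empty).items

-- ===== PORT B =====
-- vals = values; for c in dict.fromkeys(vals): out[c] = vals.count(c)
def getCountToCountOfCounts_alt (wordCount : List (String × Int)) : List (Int × Int) :=
  let vals := (PySem.Dict.mk wordCount).values
  ((PySem.List.dedup vals).foldl
    (fun out c => out.insert c ((PySem.List.count vals c : Int)))
    PySem.Dict.empty).items

-- ===== PRECONDITION & SPEC =====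
def Spec_getCountToCountOfCounts (wordCount : List (String × Int)) (out : List (Int × Int)) : Prop := out = getCountToCountOfCounts_alt wordCount
instance (wordCount : List (String × Int)) (out : List (Int × Int)) : Decidable (Spec_getCountToCountOfCounts wordCount out) := by unfold Spec_getCountToCountOfCounts; infer_instance

-- ===== CLAIM (what is proved, stated in full; the proofs are below) =====
def Claim_equal_getCountToCountOfCounts : Prop := ∀ (wordCount : List (String × Int)), Dom_getCountToCountOfCounts wordCount → Spec_getCountToCountOfCounts wordCount (getCountToCountOfCounts wordCount)

-- ===== LEMMAS AND PROOFS =====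

-- A's loop body is exactly the counter step 'insert x (getD x 0 + 1)'.
theorem pvA_eq_counter (xs : List Int) :
    xs.foldl
      (fun d count =>
        if d.contains count = false then d.insert count 1
        else d.insert count (d.getD count 0 + 1))
      PySem.Dict.empty = PySem.Dict.counter xs := by
  rw [← PySem.Dict.foldl_insert_getD_add_one_eq_counter]
  apply PySem.List.foldl_congr_mem
  intro d x _
  by_cases h : d.contains x = false
  · rw [if_pos h, PySem.Dict.getD_of_not_contains d 0 h]
    norm_num
  · rw [if_neg h]

-- B's insert loop over the distinct values appends fresh items.
theorem pvB_items (xs : List Int) :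
    ((PySem.List.dedup xs).foldl
      (fun out c => out.insert c ((PySem.List.count xs c : Int)))
      PySem.Dict.empty).items
    = (PySem.Set.ofList xs).map (fun k => (k, (PySem.List.count xs k : Int))) := by
  rw [PySem.Dict.items_foldl_insert_fresh (l := PySem.List.dedup xs) (d := PySem.Dict.empty)
        (k := fun c => c)
        (v := fun c => (PySem.List.count xs c : Int))
        (by intro a _; exact PySem.Dict.contains_empty a)
        (by simp)]
  simp [PySem.List.dedup_eq_ofList, PySem.Dict.empty]

-- ===== VERDICT (by name: the statement is the Claim_ definition above) =====
theorem getCountToCountOfCounts_spec : Claim_equal_getCountToCountOfCounts := by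
  intro wordCount _
  unfold Spec_getCountToCountOfCounts getCountToCountOfCounts getCountToCountOfCounts_alt
  rw [pvA_eq_counter, PySem.Dict.items_counter, pvB_items]
  simp [PySem.List.count_eq]
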